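-- pv_equiv track=rewrite | github.com/zimaBloo/DataStructures-Algorithms | sales.py | sales
-- ===== SOURCE A (Python) =====
-- def sales(cars, customers):
--     cars.sort()
--     customers.sort()
--     sales = 0
--     i = 0
--     j = 0
--     while i < len(cars):
--         while j < len(customers):
--             if customers[j] >= cars[i]:
--                 cars.pop(i)
--                 customers.pop(j)
--
--                 sales += 1
--                 break
--             j += 1
--         else:
--             i += 1
--
--     return sales
-- ===== SOURCE B (Python) =====
-- # B: two-pointer scan over sorted copies (no in-place pops; unlike A, B does not
-- # mutate its arguments -- the equivalence claimed is about the return value only).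
-- def sales(cars, customers):
--     ks = sorted(customers)
--     count = 0
--     j = 0
--     for c in sorted(cars):
--         while j < len(ks) and ks[j] < c:
--             j += 1
--         if j == len(ks):
--             break
--         count += 1
--         j += 1
--     return count
-- ===== Notes on version B (the rewrite author's own statement) =====
-- stated objective: faster
-- what changed: Replaces A's pop-based nested while loops that repeatedly delete matched elements from both lists with a single two-pointer scan over sorted copies that only advances indices, never mutating the lists.
import Mathlib
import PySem

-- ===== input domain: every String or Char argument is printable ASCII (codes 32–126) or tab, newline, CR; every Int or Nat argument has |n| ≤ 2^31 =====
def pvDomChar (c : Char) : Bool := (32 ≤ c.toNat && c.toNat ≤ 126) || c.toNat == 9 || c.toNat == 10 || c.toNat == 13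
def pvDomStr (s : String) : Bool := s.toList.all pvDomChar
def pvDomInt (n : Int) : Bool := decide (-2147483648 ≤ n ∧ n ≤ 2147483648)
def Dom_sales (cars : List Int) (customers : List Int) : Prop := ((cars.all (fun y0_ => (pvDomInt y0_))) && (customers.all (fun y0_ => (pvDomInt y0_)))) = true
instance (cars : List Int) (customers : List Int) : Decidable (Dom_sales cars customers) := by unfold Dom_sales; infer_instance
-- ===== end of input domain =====

-- B replaces A's quadratic pop-based matching by a two-pointer scan over sorted copies; A sorts
-- and pops its arguments in place (a side effect B does not have): only the return value is claimed equal.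

-- ===== PORT A =====
-- inner 'while j < len(customers): … j += 1' loop: returns the index j' ≥ j of the first
-- customer with customers[j'] ≥ c (the break), or none when the loop falls through (else:).
-- n counts the iterations still possible (ks.length - j at the call site): the while loop is
-- transcribed as structural recursion on that count.
def salesInner (ks : List Int) (c : Int) : Nat → Nat → Option Nat
  | 0, _ => none
  | n + 1, j =>
    if j < ks.length then
      if ks[j]! ≥ c then some j else salesInner ks c n (j + 1)
    else none

-- outer 'while i < len(cars)' loop; on a match cars.pop(i) / customers.pop(j) become eraseIdx
-- and the loop resumes with the same i and j; on fall-through j has become len(customers).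
-- n = cars.length - i bounds the iterations left (each one shortens cars or advances i).
def salesOuterGo : Nat → List Int → List Int → Nat → Nat → Int → Int
  | 0, _, _, _, _, s => s
  | n + 1, cars, ks, i, j, s =>
    if i < cars.length then
      match salesInner ks (cars[i]!) (ks.length - j) j with
      | some j' => salesOuterGo n (cars.eraseIdx i) (ks.eraseIdx j') i j' (s + 1)
      | none => salesOuterGo n cars ks (i + 1) ks.length s
    else s

def sales (cars : List Int) (customers : List Int) : Int :=
  salesOuterGo cars.length (PySem.List.sorted cars (fun x => x) false)
    (PySem.List.sorted customers (fun x => x) false) 0 0 0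

-- ===== PORT B =====
-- 'while j < len(ks) and ks[j] < c: j += 1', again structural on the remaining count n
def skipIdx (ks : List Int) (c : Int) : Nat → Nat → Nat
  | 0, j => j
  | n + 1, j =>
    if j < ks.length then
      if ks[j]! < c then skipIdx ks c n (j + 1) else j
    else j

-- 'for c in sorted(cars): …' with the break when j == len(ks)
def salesAltGo (cs : List Int) (ks : List Int) (j : Nat) (count : Int) : Int :=
  match cs with
  | [] => count
  | c :: rest =>
    let j' := skipIdx ks c (ks.length - j) j
    if j' = ks.length then count
    else salesAltGo rest ks (j' + 1) (count + 1)

def sales_alt (cars : List Int) (customers : List Int) : Int :=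
  salesAltGo (PySem.List.sorted cars (fun x => x) false)
    (PySem.List.sorted customers (fun x => x) false) 0 0

-- ===== PRECONDITION & SPEC =====
def Spec_sales (cars : List Int) (customers : List Int) (out : Int) : Prop := out = sales_alt cars customers
instance (cars : List Int) (customers : List Int) (out : Int) : Decidable (Spec_sales cars customers out) := by unfold Spec_sales; infer_instance

-- ===== CLAIM (what is proved, stated in full; the proofs are below) =====
def Claim_equal_sales : Prop := ∀ (cars : List Int) (customers : List Int), Dom_sales cars customers → Spec_sales cars customers (sales cars customers)

-- ===== LEMMAS AND PROOFS =====

-- index-free reference loop both ports are reduced to: customers not yet offered are a suffix,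
-- represented directly as a list
def goD (cs : List Int) (ks : List Int) : Int :=
  match cs with
  | [] => 0
  | c :: rest =>
    match ks.dropWhile (fun x => decide (x < c)) with
    | [] => 0
    | _ :: ktail => 1 + goD rest ktail

theorem drop_eraseIdx_self (l : List Int) (m : Nat) : (l.eraseIdx m).drop m = l.drop (m + 1) := by
  induction l generalizing m with
  | nil => simp
  | cons a t ih =>
    cases m with
    | zero => simp
    | succ m => simpa using ih m

theorem salesInner_spec (ks : List Int) (c : Int) (n j : Nat) (hn : ks.length ≤ n + j) :
    match salesInner ks c n j with
    | none => (ks.drop j).dropWhile (fun x => decide (x < c)) = []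
    | some j' => j' < ks.length ∧ ks.drop j' = (ks.drop j).dropWhile (fun x => decide (x < c)) := by
  induction n generalizing j with
  | zero =>
    have hnil : ks.drop j = [] := List.drop_eq_nil_of_le (by omega)
    simp [salesInner, hnil]
  | succ n ih =>
    by_cases h : j < ks.length
    · have hd : ks.drop j = ks[j] :: ks.drop (j + 1) := List.drop_eq_getElem_cons h
      have hgj : ks[j]! = ks[j] := getElem!_pos ks j h
      by_cases hc : ks[j]! ≥ c
      · have hnot : ¬ (ks[j] < c) := by rw [hgj] at hc; omega
        rw [salesInner]
        simp only [if_pos h, if_pos hc]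
        refine ⟨h, ?_⟩
        conv_rhs => rw [hd, List.dropWhile_cons]
        rw [if_neg (by simpa using hnot)]
        exact hd
      · have hlt : ks[j] < c := by rw [hgj] at hc; omega
        have hrw : (ks.drop j).dropWhile (fun x => decide (x < c))
            = (ks.drop (j + 1)).dropWhile (fun x => decide (x < c)) := by
          rw [hd, List.dropWhile_cons]; simp [hlt]
        rw [salesInner]
        simp only [if_pos h, if_neg hc, hrw]
        exact ih (j + 1) (by omega)
    · have hnil : ks.drop j = [] := List.drop_eq_nil_of_le (by omega)
      rw [salesInner]
      simp only [if_neg h]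
      simp [hnil]

theorem skipIdx_spec (ks : List Int) (c : Int) (n j : Nat) (hj : j ≤ ks.length)
    (hn : ks.length ≤ n + j) :
    skipIdx ks c n j ≤ ks.length ∧
      ks.drop (skipIdx ks c n j) = (ks.drop j).dropWhile (fun x => decide (x < c)) := by
  induction n generalizing j with
  | zero =>
    have hnil : ks.drop j = [] := List.drop_eq_nil_of_le (by omega)
    simp [skipIdx, hnil, hj]
  | succ n ih =>
    by_cases h : j < ks.length
    · have hd : ks.drop j = ks[j] :: ks.drop (j + 1) := List.drop_eq_getElem_cons h
      have hgj : ks[j]! = ks[j] := getElem!_pos ks j h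
      by_cases hc : ks[j]! < c
      · have hlt : ks[j] < c := by rwa [hgj] at hc
        rw [skipIdx]
        simp only [if_pos h, if_pos hc]
        obtain ⟨h1, h2⟩ := ih (j + 1) (by omega) (by omega)
        refine ⟨h1, ?_⟩
        rw [h2, hd, List.dropWhile_cons]
        simp [hlt]
      · have hnot : ¬ (ks[j] < c) := by rwa [hgj] at hc
        rw [skipIdx]
        simp only [if_pos h, if_neg hc]
        refine ⟨Nat.le_of_lt h, ?_⟩
        conv_rhs => rw [hd, List.dropWhile_cons]
        rw [if_neg (by simpa using hnot)]
        exact hd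
    · have hnil : ks.drop j = [] := List.drop_eq_nil_of_le (by omega)
      rw [skipIdx]
      simp only [if_neg h]
      simp [hnil, hj]

theorem goD_nil_right (cs : List Int) : goD cs [] = 0 := by
  cases cs <;> simp [goD]

theorem salesOuterGo_eq (n : Nat) (cars ks : List Int) (i j : Nat) (s : Int)
    (hn : cars.length ≤ n + i) :
    salesOuterGo n cars ks i j s = s + goD (cars.drop i) (ks.drop j) := by
  induction n generalizing cars ks i j s with
  | zero =>
    have hnil : cars.drop i = [] := List.drop_eq_nil_of_le (by omega)
    simp [salesOuterGo, hnil, goD]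
  | succ n ih =>
    by_cases h : i < cars.length
    · have hdc : cars.drop i = cars[i] :: cars.drop (i + 1) := List.drop_eq_getElem_cons h
      have hgi : cars[i]! = cars[i] := getElem!_pos cars i h
      have hspec := salesInner_spec ks (cars[i]!) (ks.length - j) j (by omega)
      cases hfind : salesInner ks (cars[i]!) (ks.length - j) j with
      | none =>
        rw [hfind] at hspec
        rw [salesOuterGo]
        simp only [if_pos h, hfind]
        rw [ih cars ks (i + 1) ks.length s (by omega), hdc]
        simp only [goD, hgi] at hspec ⊢
        rw [hspec]
        simp [goD_nil_right]
      | some j' =>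
        rw [hfind] at hspec
        obtain ⟨hj'len, hdrop⟩ := hspec
        rw [hgi] at hdrop
        rw [salesOuterGo]
        simp only [if_pos h, hfind]
        have hlen : (cars.eraseIdx i).length = cars.length - 1 := List.length_eraseIdx_of_lt h
        rw [ih (cars.eraseIdx i) (ks.eraseIdx j') i j' (s + 1) (by omega),
          drop_eraseIdx_self, drop_eraseIdx_self, hdc]
        simp only [goD]
        rw [← hdrop, List.drop_eq_getElem_cons hj'len]
        ring
    · have hnil : cars.drop i = [] := List.drop_eq_nil_of_le (by omega)
      rw [salesOuterGo]
      simp [h, hnil, goD]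

theorem salesAltGo_eq (cs ks : List Int) (j : Nat) (count : Int) (hj : j ≤ ks.length) :
    salesAltGo cs ks j count = count + goD cs (ks.drop j) := by
  induction cs generalizing j count with
  | nil => simp [salesAltGo, goD]
  | cons c rest ih =>
    obtain ⟨hle, hdrop⟩ := skipIdx_spec ks c (ks.length - j) j hj (by omega)
    simp only [salesAltGo, goD]
    by_cases hend : skipIdx ks c (ks.length - j) j = ks.length
    · have hnil : ks.drop (skipIdx ks c (ks.length - j) j) = [] := by simp [hend]
      rw [hnil] at hdrop
      simp [hend, ← hdrop]
    · have hlt : skipIdx ks c (ks.length - j) j < ks.length := by omega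
      have hcons : ks.drop (skipIdx ks c (ks.length - j) j)
          = ks[skipIdx ks c (ks.length - j) j] :: ks.drop (skipIdx ks c (ks.length - j) j + 1) :=
        List.drop_eq_getElem_cons hlt
      rw [hcons] at hdrop
      rw [if_neg hend, ih (skipIdx ks c (ks.length - j) j + 1) (count + 1) (by omega), ← hdrop]
      ring

-- ===== VERDICT (by name: the statement is the Claim_ definition above) =====
theorem sales_spec : Claim_equal_sales := by
  intro cars customers _
  unfold Spec_sales sales sales_alt
  rw [salesOuterGo_eq _ _ _ _ _ _ (by simp [PySem.List.length_sorted]),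
    salesAltGo_eq _ _ _ _ (Nat.zero_le _)]
  simp
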